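-- pv_equiv track=rewrite | github.com/rain1024/kore | kore/architecture_layout.py | _find_empty_position
-- ===== SOURCE A (Python) =====
-- from typing import Dict, List, Set, Tuple, Optional
--
-- def _find_empty_position(occupied: Set[Tuple[int, int]]) -> Tuple[int, int]:
--     """Find an empty grid position"""
--     row, col = 0, 0
--     while (row, col) in occupied:
--         col += 1
--         if col > 10:
--             col = 0
--             row += 1
--     return row, col
-- ===== SOURCE B (Python) =====
-- def _find_empty_position(occupied):
--     """Find an empty grid position"""
--     # encode every position the row-major scan could ever visit as n = 11*r + c,
--     # then the answer is the mex (first gap) of that index set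
--     ks = {11 * r + c for (r, c) in occupied if r >= 0 and 0 <= c <= 10}
--     m = 0
--     for v in sorted(ks):
--         if v == m:
--             m += 1
--         else:
--             break
--     return divmod(m, 11)
-- ===== Notes on version B (the rewrite author's own statement) =====
-- stated objective: alternative
-- what changed: A probes grid cells one by one in row-major order with a (row, col) carry branch until it finds a free one; B instead encodes each reachable occupied cell as an index 11*r+c and returns divmod of the mex of that index set, computed by a single sort-then-scan over the occupied set.
import Mathlib
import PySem

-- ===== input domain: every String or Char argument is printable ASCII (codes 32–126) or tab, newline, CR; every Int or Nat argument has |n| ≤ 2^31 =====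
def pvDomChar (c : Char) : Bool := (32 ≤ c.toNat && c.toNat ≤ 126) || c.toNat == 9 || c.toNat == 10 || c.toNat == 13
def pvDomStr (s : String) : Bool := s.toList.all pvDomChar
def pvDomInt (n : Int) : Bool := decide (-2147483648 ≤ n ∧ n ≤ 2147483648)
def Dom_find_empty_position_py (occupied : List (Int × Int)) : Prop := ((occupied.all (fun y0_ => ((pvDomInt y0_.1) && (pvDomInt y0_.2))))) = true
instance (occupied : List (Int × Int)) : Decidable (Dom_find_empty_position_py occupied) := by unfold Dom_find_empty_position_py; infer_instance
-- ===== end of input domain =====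

-- B replaces A's sequential probing of the grid (row/col state with a carry branch) by a
-- sort-then-scan mex of the encoded indices 11*r+c of the reachable occupied cells (alternative algorithm).

-- ===== PORT A =====
-- the while loop of A; the fuel `occupied.length + 1` is a totality guard only: the loop
-- visits pairwise-distinct positions, so it stops within |occupied| + 1 membership tests
def findLoopA (occ : List (Int × Int)) : Nat → Int → Int → Int × Int
  | 0, row, col => (row, col)
  | fuel + 1, row, col =>
    if (row, col) ∈ occ then
      let col' := col + 1
      if col' > 10 then findLoopA occ fuel (row + 1) 0
      else findLoopA occ fuel row col'
    else (row, col)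

def find_empty_position_py (occupied : List (Int × Int)) : Int × Int :=
  findLoopA occupied (occupied.length + 1) 0 0

-- ===== PORT B =====
-- the `for v in sorted(ks): if v == m: m += 1 else: break` scan of Source B
def mexScan : Int → List Int → Int
  | e, [] => e
  | e, v :: t => if v = e then mexScan (e + 1) t else e

def find_empty_position_py_alt (occupied : List (Int × Int)) : Int × Int :=
  let ks : PySem.Set Int := PySem.Set.ofList
    (occupied.filterMap (fun p =>
      if 0 ≤ p.1 ∧ 0 ≤ p.2 ∧ p.2 ≤ 10 then some (11 * p.1 + p.2) else none))
  let m := mexScan 0 (PySem.List.sorted ks (fun x => x) false)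
  (PySem.Int.floordiv m 11, PySem.Int.mod m 11)

-- ===== PRECONDITION & SPEC =====
def Spec_find_empty_position_py (occupied : List (Int × Int)) (out : Int × Int) : Prop := out = find_empty_position_py_alt occupied
instance (occupied : List (Int × Int)) (out : Int × Int) : Decidable (Spec_find_empty_position_py occupied out) := by unfold Spec_find_empty_position_py; infer_instance

-- ===== CLAIM (what is proved, stated in full; the proofs are below) =====
def Claim_equal_find_empty_position_py : Prop := ∀ (occupied : List (Int × Int)), Dom_find_empty_position_py occupied → Spec_find_empty_position_py occupied (find_empty_position_py occupied)

-- ===== LEMMAS AND PROOFS =====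

-- the index list Source B encodes
def encList (occ : List (Int × Int)) : List Int :=
  occ.filterMap (fun p =>
    if 0 ≤ p.1 ∧ 0 ≤ p.2 ∧ p.2 ≤ 10 then some (11 * p.1 + p.2) else none)

-- membership characterisation: for n ≥ 0, position (n//11, n%11) is occupied iff n is encoded
lemma mem_encList_iff (occ : List (Int × Int)) (n : Int) (hn : 0 ≤ n) :
    n ∈ encList occ ↔ (n / 11, n % 11) ∈ occ := by
  unfold encList
  simp only [List.mem_filterMap]
  constructor
  · rintro ⟨p, hp, h⟩
    split_ifs at h with hv
    · obtain ⟨h1, h2, h3⟩ := hv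
      injection h with h
      have hr : n / 11 = p.1 := by omega
      have hc : n % 11 = p.2 := by omega
      rw [hr, hc]; exact hp
  · intro hmem
    refine ⟨(n / 11, n % 11), hmem, ?_⟩
    have h1 : 0 ≤ n / 11 := by omega
    have h2 : 0 ≤ n % 11 := by omega
    have h3 : n % 11 ≤ 10 := by omega
    rw [if_pos ⟨h1, h2, h3⟩]
    congr 1
    omega

lemma encList_nonneg (occ : List (Int × Int)) : ∀ x ∈ encList occ, 0 ≤ x := by
  intro x hx
  unfold encList at hx
  simp only [List.mem_filterMap] at hx
  obtain ⟨p, _, h⟩ := hx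
  split_ifs at h with hv
  · injection h with h; omega

lemma encList_length_le (occ : List (Int × Int)) : (encList occ).length ≤ occ.length :=
  List.length_filterMap_le _ _

-- the scan's result: at most e + length
lemma mexScan_le (l : List Int) (e : Int) : mexScan e l ≤ e + l.length := by
  induction l generalizing e with
  | nil => simp [mexScan]
  | cons v t ih =>
    by_cases h : v = e
    · have := ih (e + 1)
      simp only [mexScan, if_pos h, List.length_cons]
      push_cast
      omega
    · simp only [mexScan, if_neg h, List.length_cons]
      push_cast
      omega

-- the scan's specification on a strictly increasing list bounded below by e:
-- its result is the mex above e
lemma mexScan_spec (l : List Int) (e : Int)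
    (hsorted : l.Pairwise (· < ·)) (hlb : ∀ x ∈ l, e ≤ x) :
    e ≤ mexScan e l ∧ (∀ j, e ≤ j → j < mexScan e l → j ∈ l) ∧ mexScan e l ∉ l := by
  induction l generalizing e with
  | nil => simp [mexScan]
  | cons v t ih =>
    rcases List.pairwise_cons.mp hsorted with ⟨hvt, ht⟩
    by_cases hv : v = e
    · subst hv
      have hstep : mexScan v (v :: t) = mexScan (v + 1) t := by
        simp only [mexScan]
        split_ifs with hcond
        · rfl
        · simp at hcond
      have hlb' : ∀ x ∈ t, v + 1 ≤ x := fun x hx => by have := hvt x hx; omega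
      obtain ⟨h1, h2, h3⟩ := ih (v + 1) ht hlb'
      refine ⟨by rw [hstep]; omega, ?_, ?_⟩
      · intro j hj1 hj2
        rw [hstep] at hj2
        by_cases hje : j = v
        · simp [hje]
        · exact List.mem_cons_of_mem _ (h2 j (by omega) hj2)
      · rw [hstep]
        intro hmem
        rcases List.mem_cons.mp hmem with h | h
        · omega
        · exact h3 h
    · have hstep : mexScan e (v :: t) = e := by
        simp only [mexScan, if_neg hv]
      refine ⟨by rw [hstep], ?_, ?_⟩
      · intro j hj1 hj2
        rw [hstep] at hj2
        omega
      · rw [hstep]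
        intro hmem
        rcases List.mem_cons.mp hmem with h | h
        · exact hv h.symm
        · have h1 := hlb v (by simp)
          have h2 := hvt e h
          omega

-- A's loop, started at scan index n, reaches the mex m
lemma findLoopA_reaches (occ : List (Int × Int)) (m : Int)
    (hocc : ∀ j, 0 ≤ j → j < m → (j / 11, j % 11) ∈ occ)
    (hm : (m / 11, m % 11) ∉ occ) :
    ∀ (fuel : Nat) (n : Int), 0 ≤ n → n ≤ m → m - n < fuel →
      findLoopA occ fuel (n / 11) (n % 11) = (m / 11, m % 11) := by
  intro fuel
  induction fuel with
  | zero => intro n _ _ h; omega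
  | succ f ih =>
    intro n hn0 hnm hf
    by_cases heq : n = m
    · subst heq
      simp only [findLoopA, if_neg hm]
    · have hlt : n < m := lt_of_le_of_ne hnm heq
      have hmem : (n / 11, n % 11) ∈ occ := hocc n hn0 hlt
      simp only [findLoopA, if_pos hmem]
      have hrec := ih (n + 1) (by omega) (by omega) (by omega)
      by_cases hc : n % 11 + 1 > 10
      · rw [if_pos hc]
        have h1 : n / 11 + 1 = (n + 1) / 11 := by omega
        have h2 : (0 : Int) = (n + 1) % 11 := by omega
        rw [h1, h2]; exact hrec
      · rw [if_neg hc]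
        have h1 : n / 11 = (n + 1) / 11 := by omega
        have h2 : n % 11 + 1 = (n + 1) % 11 := by omega
        rw [h1, h2]; exact hrec

-- ===== VERDICT (by name: the statement is the Claim_ definition above) =====
theorem find_empty_position_py_spec : Claim_equal_find_empty_position_py := by
  intro occ _
  show find_empty_position_py occ = find_empty_position_py_alt occ
  set l := PySem.List.sorted (PySem.Set.ofList (encList occ)) (fun x => x) false with hldef
  set m := mexScan 0 l with hmdef
  have hB : find_empty_position_py_alt occ = (PySem.Int.floordiv m 11, PySem.Int.mod m 11) := rfl
  have hA : find_empty_position_py occ = findLoopA occ (occ.length + 1) 0 0 := rfl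
  have hmeml : ∀ x : Int, x ∈ l ↔ x ∈ encList occ := by
    intro x
    rw [hldef, PySem.List.mem_sorted, PySem.Set.mem_ofList]
  have hsorted : l.Pairwise (· < ·) := PySem.List.sorted_ofList_pairwise_lt _
  have hlb : ∀ x ∈ l, (0 : Int) ≤ x := fun x hx =>
    encList_nonneg occ x ((hmeml x).mp hx)
  obtain ⟨hm0, hbelow, hnotmem⟩ := mexScan_spec l 0 hsorted hlb
  have hocc : ∀ j, 0 ≤ j → j < m → (j / 11, j % 11) ∈ occ := by
    intro j hj0 hjm
    exact (mem_encList_iff occ j hj0).mp ((hmeml j).mp (hbelow j hj0 hjm))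
  have hmnot : (m / 11, m % 11) ∉ occ := by
    intro hmem
    exact hnotmem ((hmeml m).mpr ((mem_encList_iff occ m hm0).mpr hmem))
  have hlen : m ≤ (occ.length : Int) := by
    have h1 := mexScan_le l 0
    have h2 : l.length = (PySem.Set.ofList (encList occ)).length := by
      rw [hldef, PySem.List.length_sorted]
    have h3 := PySem.Set.length_ofList_le (encList occ)
    have h4 := encList_length_le occ
    omega
  have hrun := findLoopA_reaches occ m hocc hmnot (occ.length + 1) 0 le_rfl hm0 (by push_cast; omega)
  have hz1 : (0 : Int) / 11 = 0 := rfl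
  have hz2 : (0 : Int) % 11 = 0 := rfl
  rw [hz1, hz2] at hrun
  rw [hA, hB, hrun, PySem.Int.floordiv_eq_ediv_of_pos (by omega : (0:Int) < 11),
    PySem.Int.mod_eq_emod_of_pos (by omega : (0:Int) < 11)]
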